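-- pv_equiv track=rewrite | github.com/skoppaka-67/Tech_M- | LCaaS/JAVA/process_flow.py | getfirstline
-- ===== SOURCE A (Python) =====
-- def getfirstline(Lines,index):
--     line = ""
--     if "(" in Lines[index] and  ")" in Lines[index]:
--         return Lines[index]
--     if not ")" in Lines[index]:
--         line = line+Lines[index]
--         return line+getfirstline(Lines,index+1)
--     if not "(" in Lines[index] and ")" in Lines[index]:
--         return line+Lines[index]
-- ===== SOURCE B (Python) =====
-- def getfirstline(Lines, index):
--     result = ""
--     while True:
--         cur = Lines[index]
--         if ")" in cur:
--             return result + cur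
--         result += cur
--         index += 1
-- ===== Notes on version B (the rewrite author's own statement) =====
-- stated objective: simpler
-- what changed: Replaced the three-branch recursion by a single iterative accumulator loop: append lines to result until one containing ')' is found, then return result plus that line.
import Mathlib
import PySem

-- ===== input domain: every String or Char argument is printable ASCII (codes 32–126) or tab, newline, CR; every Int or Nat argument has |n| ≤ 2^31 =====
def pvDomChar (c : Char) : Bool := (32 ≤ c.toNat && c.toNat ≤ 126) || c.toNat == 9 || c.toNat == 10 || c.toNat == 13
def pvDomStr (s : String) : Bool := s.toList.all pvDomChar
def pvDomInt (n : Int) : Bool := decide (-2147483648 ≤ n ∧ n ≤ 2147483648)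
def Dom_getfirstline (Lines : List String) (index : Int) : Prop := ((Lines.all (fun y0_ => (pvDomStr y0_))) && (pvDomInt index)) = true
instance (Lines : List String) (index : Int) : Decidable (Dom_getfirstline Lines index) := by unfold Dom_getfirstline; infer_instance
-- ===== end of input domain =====

-- B replaces A's three-branch recursion by one iterative accumulator loop (same return values; no speed claim).

-- measure for both ports: number of remaining Python list accesses before termination or IndexError
def pvFuel (len : Nat) (index : Int) : Nat :=
  if index < 0 then (-index).toNat + len + 1 else len - index.toNat

theorem pvFuel_dec {α : Type} {xs : List α} {i : Int} {x : α}
    (h : PySem.List.pyGet? xs i = some x) : pvFuel xs.length (i + 1) < pvFuel xs.length i := by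
  have hin : PySem.Raise.InRange xs.length i := by
    by_contra hc
    rw [← PySem.List.pyGet?_eq_none_iff] at hc
    simp [hc] at h
  simp only [PySem.Raise.InRange] at hin
  simp only [pvFuel]
  split_ifs <;> omega

-- ===== PORT A =====
def getfirstline (Lines : List String) (index : Int) : String :=
  match h : PySem.List.pyGet? Lines index with
  | none => ""   -- Python raises IndexError here; excluded by Pre_
  | some cur =>
    if PySem.Str.isIn "(" cur && PySem.Str.isIn ")" cur then cur
    else if !(PySem.Str.isIn ")" cur) then ("" ++ cur) ++ getfirstline Lines (index + 1)
    else if !(PySem.Str.isIn "(" cur) && PySem.Str.isIn ")" cur then "" ++ cur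
    else ""   -- Python's implicit fall-through (unreachable)
termination_by pvFuel Lines.length index
decreasing_by exact pvFuel_dec h

-- ===== PORT B =====
def getfirstlineLoop (Lines : List String) (index : Int) (result : String) : String :=
  match h : PySem.List.pyGet? Lines index with
  | none => result   -- Python raises IndexError here; excluded by Pre_
  | some cur =>
    if PySem.Str.isIn ")" cur then result ++ cur
    else getfirstlineLoop Lines (index + 1) (result ++ cur)
termination_by pvFuel Lines.length index
decreasing_by exact pvFuel_dec h

def getfirstline_alt (Lines : List String) (index : Int) : String :=
  getfirstlineLoop Lines index ""

-- ===== PRECONDITION & SPEC =====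
-- Pre_ excludes exactly the inputs on which Python A raises IndexError: the first access must be in
-- range, and a line containing ")" must be reachable (from a negative index the scan wraps past -1
-- to position 0, so every line is reachable; from a nonnegative index only the suffix is).
def Pre_getfirstline (Lines : List String) (index : Int) : Prop :=
  PySem.Raise.InRange Lines.length index ∧
  (if index < 0 then Lines.any (fun l => PySem.Str.isIn ")" l) = true
   else (Lines.drop index.toNat).any (fun l => PySem.Str.isIn ")" l) = true)
instance (Lines : List String) (index : Int) : Decidable (Pre_getfirstline Lines index) := by
  unfold Pre_getfirstline; infer_instance

def pvWitness_getfirstline : List String × Int := (["foo(a,", "b,", "c)"], 0)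

def Spec_getfirstline (Lines : List String) (index : Int) (out : String) : Prop := out = getfirstline_alt Lines index
instance (Lines : List String) (index : Int) (out : String) : Decidable (Spec_getfirstline Lines index out) := by unfold Spec_getfirstline; infer_instance

-- ===== CLAIM (what is proved, stated in full; the proofs are below) =====
def Claim_equal_getfirstline : Prop := ∀ (Lines : List String) (index : Int), Dom_getfirstline Lines index → Pre_getfirstline Lines index → Spec_getfirstline Lines index (getfirstline Lines index)

-- ===== LEMMAS AND PROOFS =====

-- branch-level unfolding of port A
theorem getfirstline_none (Lines : List String) (index : Int)
    (h : PySem.List.pyGet? Lines index = none) : getfirstline Lines index = "" := by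
  rw [getfirstline]; split <;> simp_all

theorem getfirstline_hit (Lines : List String) (index : Int) (cur : String)
    (h : PySem.List.pyGet? Lines index = some cur) (hc : PySem.Str.isIn ")" cur = true) :
    getfirstline Lines index = cur := by
  rw [getfirstline]; split <;> cases hp : PySem.Str.isIn "(" cur <;> simp_all

theorem getfirstline_step (Lines : List String) (index : Int) (cur : String)
    (h : PySem.List.pyGet? Lines index = some cur) (hc : PySem.Str.isIn ")" cur = false) :
    getfirstline Lines index = cur ++ getfirstline Lines (index + 1) := by
  rw [getfirstline]; split <;> simp_all

-- branch-level unfolding of port B's loop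
theorem getfirstlineLoop_none (Lines : List String) (index : Int) (result : String)
    (h : PySem.List.pyGet? Lines index = none) : getfirstlineLoop Lines index result = result := by
  rw [getfirstlineLoop]; split <;> simp_all

theorem getfirstlineLoop_hit (Lines : List String) (index : Int) (result cur : String)
    (h : PySem.List.pyGet? Lines index = some cur) (hc : PySem.Str.isIn ")" cur = true) :
    getfirstlineLoop Lines index result = result ++ cur := by
  rw [getfirstlineLoop]; split <;> simp_all

theorem getfirstlineLoop_step (Lines : List String) (index : Int) (result cur : String)
    (h : PySem.List.pyGet? Lines index = some cur) (hc : PySem.Str.isIn ")" cur = false) :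
    getfirstlineLoop Lines index result = getfirstlineLoop Lines (index + 1) (result ++ cur) := by
  rw [getfirstlineLoop]; split <;> simp_all

-- loop invariant: the accumulator is a prefix of the final answer
theorem getfirstlineLoop_eq (Lines : List String) (index : Int) (result : String) :
    getfirstlineLoop Lines index result = result ++ getfirstline Lines index := by
  induction index using getfirstline.induct (Lines := Lines) generalizing result with
  | case1 index h =>
    rw [getfirstlineLoop_none Lines index result h, getfirstline_none Lines index h]
    simp
  | case2 index cur h hb =>
    have hc : PySem.Str.isIn ")" cur = true := by
      cases hx : PySem.Str.isIn ")" cur <;> simp_all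
    rw [getfirstlineLoop_hit Lines index result cur h hc, getfirstline_hit Lines index cur h hc]
  | case3 index cur h hb1 hb2 ih =>
    have hc : PySem.Str.isIn ")" cur = false := by
      cases hx : PySem.Str.isIn ")" cur <;> simp_all
    rw [getfirstlineLoop_step Lines index result cur h hc, ih,
        getfirstline_step Lines index cur h hc, String.append_assoc]
  | case4 index cur h hb1 hb2 hb3 =>
    have hc : PySem.Str.isIn ")" cur = true := by
      cases hx : PySem.Str.isIn ")" cur <;> simp_all
    rw [getfirstlineLoop_hit Lines index result cur h hc, getfirstline_hit Lines index cur h hc]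
  | case5 index cur h hb1 hb2 hb3 =>
    exfalso
    cases hx : PySem.Str.isIn "(" cur <;> cases hy : PySem.Str.isIn ")" cur <;> simp_all

-- ===== VERDICT (by name: the statement is the Claim_ definition above) =====
theorem getfirstline_spec : Claim_equal_getfirstline := by
  intro Lines index _ _
  unfold Spec_getfirstline getfirstline_alt
  rw [getfirstlineLoop_eq]
  simp
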